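-- pv_equiv track=rewrite | github.com/manthanmtg/mazeru_cab_bill | main.py | get_nth_longest
-- ===== SOURCE A (Python) =====
-- def get_nth_longest(lst, n, longer_than=10):
--     _lt = 1
--     for i in lst:
--         if len(i) > longer_than:
--             if _lt == n:
--                 return i
--             _lt += 1
--     return "NA"
-- ===== SOURCE B (Python) =====
-- def get_nth_longest(lst, n, longer_than=10):
--     total = sum(1 for s in lst if len(s) > longer_than)
--     if not 1 <= n <= total:
--         return "NA"
--     remaining = total - n  # matches to skip when walking from the back
--     for s in reversed(lst):
--         if len(s) > longer_than:
--             if remaining == 0: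
--                 return s
--             remaining -= 1
--     return "NA"
-- ===== Notes on version B (the rewrite author's own statement) =====
-- stated objective: alternative
-- what changed: Replaces A's single forward loop with counter _lt by two staged passes: first count the qualifying strings (rejecting n outside 1..total up front), then walk the list in REVERSE, skipping total-n qualifying strings from the back; correct because the nth match from the front is the (total-n+1)th match from the back.
import Mathlib
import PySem

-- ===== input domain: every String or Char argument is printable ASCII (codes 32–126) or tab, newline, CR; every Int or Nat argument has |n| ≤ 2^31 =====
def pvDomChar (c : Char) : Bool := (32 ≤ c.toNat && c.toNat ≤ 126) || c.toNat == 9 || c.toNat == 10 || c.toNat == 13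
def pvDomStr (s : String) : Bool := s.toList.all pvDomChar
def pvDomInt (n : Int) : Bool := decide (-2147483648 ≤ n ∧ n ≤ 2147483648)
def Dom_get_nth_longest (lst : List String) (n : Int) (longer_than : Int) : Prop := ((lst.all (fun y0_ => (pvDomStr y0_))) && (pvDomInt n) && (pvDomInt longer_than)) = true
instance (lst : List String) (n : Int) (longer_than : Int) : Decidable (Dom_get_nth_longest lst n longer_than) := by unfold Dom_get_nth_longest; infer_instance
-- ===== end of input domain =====

-- B replaces A's forward counting loop by a staged count pass plus a reverse scan skipping total-n matches from the back (alternative decomposition).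


-- ===== PORT A =====
-- A's loop with counter _lt and early return, as a helper recursion over lst carrying the counter.
def get_nth_longest_go (lst : List String) (n : Int) (longer_than : Int) (_lt : Int) : String :=
  match lst with
  | [] => "NA"
  | i :: rest =>
    if (i.toList.length : Int) > longer_than then
      if _lt = n then i
      else get_nth_longest_go rest n longer_than (_lt + 1)
    else get_nth_longest_go rest n longer_than _lt

def get_nth_longest (lst : List String) (n : Int) (longer_than : Int) : String :=
  get_nth_longest_go lst n longer_than 1

-- ===== PORT B =====
-- Source B's reverse scan: skip `remaining` qualifying strings, return the next one; "NA" at the end (fallthrough).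
def get_nth_longest_alt_go (lst : List String) (remaining : Int) (longer_than : Int) : String :=
  match lst with
  | [] => "NA"
  | s :: rest =>
    if (s.toList.length : Int) > longer_than then
      if remaining = 0 then s
      else get_nth_longest_alt_go rest (remaining - 1) longer_than
    else get_nth_longest_alt_go rest remaining longer_than

-- Source B: total = count of qualifying strings; reject n outside 1..total; reverse scan skipping total - n matches.
def get_nth_longest_alt (lst : List String) (n : Int) (longer_than : Int) : String :=
  let total : Int := (lst.countP (fun s => decide ((s.toList.length : Int) > longer_than)) : Nat)
  if 1 ≤ n ∧ n ≤ total then get_nth_longest_alt_go lst.reverse (total - n) longer_than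
  else "NA"

-- ===== PRECONDITION & SPEC =====
def Spec_get_nth_longest (lst : List String) (n : Int) (longer_than : Int) (out : String) : Prop := out = get_nth_longest_alt lst n longer_than
instance (lst : List String) (n : Int) (longer_than : Int) (out : String) : Decidable (Spec_get_nth_longest lst n longer_than out) := by unfold Spec_get_nth_longest; infer_instance

-- ===== CLAIM (what is proved, stated in full; the proofs are below) =====
def Claim_equal_get_nth_longest : Prop := ∀ (lst : List String) (n : Int) (longer_than : Int), Dom_get_nth_longest lst n longer_than → Spec_get_nth_longest lst n longer_than (get_nth_longest lst n longer_than)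

-- ===== LEMMAS AND PROOFS =====

-- A's loop with counter c returns the (n-c)-th element of the filtered list when c ≤ n < c + its length, else "NA".
theorem get_nth_longest_go_eq (lst : List String) (n longer_than : Int) :
    ∀ c : Int, get_nth_longest_go lst n longer_than c =
      (let m := lst.filter (fun s => (s.toList.length : Int) > longer_than)
       if c ≤ n ∧ n < c + (m.length : Int) then m.getD (n - c).toNat "NA" else "NA") := by
  induction lst with
  | nil => intro c; simp [get_nth_longest_go]
  | cons i rest ih =>
    intro c
    simp only [get_nth_longest_go]
    by_cases hp : (i.toList.length : Int) > longer_than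
    · rw [List.filter_cons_of_pos (by simpa using hp)]
      by_cases hc : c = n
      · subst hc
        rw [if_pos hp, if_pos rfl,
          if_pos (show c ≤ c ∧ c < c + (((i :: rest.filter (fun s => (s.toList.length : Int) > longer_than)).length : Int)) by
            constructor
            · exact le_refl c
            · simp only [List.length_cons]; push_cast; omega)]
        simp
      · rw [if_pos hp, if_neg hc, ih (c + 1)]
        by_cases h1 : c + 1 ≤ n ∧ n < c + 1 + ((rest.filter (fun s => (s.toList.length : Int) > longer_than)).length : Int)
        · rw [if_pos h1,
            if_pos (show c ≤ n ∧ n < c + (((i :: rest.filter (fun s => (s.toList.length : Int) > longer_than)).length : Int)) by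
              simp only [List.length_cons] at h1 ⊢; push_cast at h1 ⊢; omega)]
          have : (n - c).toNat = (n - (c + 1)).toNat + 1 := by omega
          rw [this]
          simp
        · rw [if_neg h1,
            if_neg (show ¬ (c ≤ n ∧ n < c + (((i :: rest.filter (fun s => (s.toList.length : Int) > longer_than)).length : Int))) by
              simp only [List.length_cons] at h1 ⊢; push_cast at h1 ⊢; omega)]
    · rw [List.filter_cons_of_neg (by simpa using hp)]
      rw [if_neg hp, ih c]

-- B's reverse-scan helper with nonnegative skip count r returns the r-th element of the filtered list.
theorem get_nth_longest_alt_go_eq (lst : List String) (longer_than : Int) :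
    ∀ r : Int, 0 ≤ r → get_nth_longest_alt_go lst r longer_than =
      (lst.filter (fun s => (s.toList.length : Int) > longer_than)).getD r.toNat "NA" := by
  induction lst with
  | nil => intro r _; simp [get_nth_longest_alt_go]
  | cons s rest ih =>
    intro r hr
    simp only [get_nth_longest_alt_go]
    by_cases hp : (s.toList.length : Int) > longer_than
    · rw [List.filter_cons_of_pos (by simpa using hp), if_pos hp]
      by_cases h0 : r = 0
      · subst h0; simp
      · rw [if_neg h0, ih (r - 1) (by omega)]
        have : r.toNat = (r - 1).toNat + 1 := by omega
        rw [this]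
        simp
    · rw [List.filter_cons_of_neg (by simpa using hp), if_neg hp, ih r hr]

-- ===== VERDICT (by name: the statement is the Claim_ definition above) =====
theorem get_nth_longest_spec : Claim_equal_get_nth_longest := by
  intro lst n longer_than _
  unfold Spec_get_nth_longest get_nth_longest get_nth_longest_alt
  rw [get_nth_longest_go_eq lst n longer_than 1]
  simp only [List.countP_eq_length_filter]
  set m := lst.filter (fun s => (s.toList.length : Int) > longer_than) with hm
  have hrev : lst.reverse.filter (fun s => (s.toList.length : Int) > longer_than) = m.reverse := by
    rw [hm, List.filter_reverse]
  by_cases h : 1 ≤ n ∧ n ≤ (m.length : Int)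
  · rw [if_pos (by omega), if_pos h,
      get_nth_longest_alt_go_eq lst.reverse longer_than ((m.length : Int) - n) (by omega), hrev]
    simp only [List.getD_eq_getElem?_getD]
    rw [List.getElem?_reverse (by omega)]
    congr 2
    omega
  · rw [if_neg (by omega), if_neg h]
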